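-- pv_equiv track=rewrite | github.com/AdrianN001/advent_of_code2024 | day_4/part_one.py | get_neighbour_block
-- ===== SOURCE A (Python) =====
-- def try_index(input: list[list], x: int, y: int) -> str:
--     if y < 0 or y >= len(input):
--         return ''
--     row = input[y]
--     if x < 0 or x >= len(row):
--         return ''
--     return row[x]
--
-- def get_neighbour_block(input: list[list], x: int, y: int, radius: int) -> list[str]:
--     neighbours = []
--
--     for y_offset in range(-radius // 2, radius // 2 + 1):
--         row = []
--         for x_offset in range(-radius // 2, radius // 2 + 1):
--             row.append(try_index(input, x + x_offset, y + y_offset))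
--         neighbours.append(row)
--
--     return neighbours
-- ===== SOURCE B (Python) =====
-- def get_neighbour_block(input: list[list], x: int, y: int, radius: int) -> list[str]:
--     lo = -radius // 2
--     hi = radius // 2
--     width = hi - lo + 1
--     if width <= 0:
--         return []
--     out = []
--     for dy in range(lo, hi + 1):
--         r = y + dy
--         if r < 0 or r >= len(input):
--             out.append([''] * width)
--         else:
--             row = input[r]
--             a = max(0, x + lo)
--             b = min(len(row), x + hi + 1)
--             seg = row[a:b] if a < b else []
--             left = min(width, max(0, a - (x + lo)))
--             right = width - left - len(seg)
--             out.append([''] * left + seg + [''] * right)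
--     return out
-- ===== Notes on version B (the rewrite author's own statement) =====
-- stated objective: alternative
-- what changed: Replaces the per-cell try_index double loop with one pass per row offset: out-of-range rows become a full row of '', in-range rows are built as one clamped slice of the source row padded with '' on each side.
import Mathlib
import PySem

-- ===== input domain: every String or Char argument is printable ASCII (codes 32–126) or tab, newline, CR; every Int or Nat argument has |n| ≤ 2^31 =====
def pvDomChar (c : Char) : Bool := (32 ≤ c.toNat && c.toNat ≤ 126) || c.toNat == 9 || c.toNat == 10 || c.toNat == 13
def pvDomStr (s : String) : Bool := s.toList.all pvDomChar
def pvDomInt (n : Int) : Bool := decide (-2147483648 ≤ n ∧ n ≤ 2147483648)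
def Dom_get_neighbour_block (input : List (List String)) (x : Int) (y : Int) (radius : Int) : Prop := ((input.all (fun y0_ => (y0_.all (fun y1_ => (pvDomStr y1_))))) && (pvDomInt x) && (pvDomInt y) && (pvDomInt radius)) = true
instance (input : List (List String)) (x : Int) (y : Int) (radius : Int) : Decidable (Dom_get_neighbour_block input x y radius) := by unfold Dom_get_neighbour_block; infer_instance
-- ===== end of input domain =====

-- B builds each output row in one go (full '' row when the row offset is outside the grid,
-- otherwise one clamped slice of the source row padded with '' on each side) instead of A's
-- per-cell try_index double loop; objective: alternative decomposition, same output.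

-- ===== PORT A =====
def try_index (input : List (List String)) (x : Int) (y : Int) : String :=
  if y < 0 ∨ y ≥ (input.length : Int) then ""
  else
    let row := (PySem.List.pyGet? input y).getD []
    if x < 0 ∨ x ≥ (row.length : Int) then ""
    else (PySem.List.pyGet? row x).getD ""

def get_neighbour_block (input : List (List String)) (x : Int) (y : Int) (radius : Int) : List (List String) :=
  (PySem.List.pyRange (PySem.Int.floordiv (-radius) 2) (PySem.Int.floordiv radius 2 + 1) 1).foldl
    (fun neighbours y_offset =>
      neighbours ++
        [(PySem.List.pyRange (PySem.Int.floordiv (-radius) 2) (PySem.Int.floordiv radius 2 + 1) 1).foldl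
          (fun row x_offset => row ++ [try_index input (x + x_offset) (y + y_offset)]) []])
    []

-- ===== PORT B =====
def get_neighbour_block_alt (input : List (List String)) (x : Int) (y : Int) (radius : Int) : List (List String) :=
  let lo := PySem.Int.floordiv (-radius) 2
  let hi := PySem.Int.floordiv radius 2
  let width := hi - lo + 1
  if width ≤ 0 then []
  else
    (PySem.List.pyRange lo (hi + 1) 1).map (fun dy =>
      let r := y + dy
      if r < 0 ∨ r ≥ (input.length : Int) then List.replicate width.toNat ""
      else
        let row := (PySem.List.pyGet? input r).getD []
        let a := max 0 (x + lo)
        let b := min (row.length : Int) (x + hi + 1)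
        let seg := if a < b then PySem.List.slice row (some a) (some b) else []
        let left := min width (max 0 (a - (x + lo)))
        let right := width - left - (seg.length : Int)
        List.replicate left.toNat "" ++ seg ++ List.replicate right.toNat "")

-- ===== PRECONDITION & SPEC =====
def Spec_get_neighbour_block (input : List (List String)) (x : Int) (y : Int) (radius : Int) (out : List (List String)) : Prop := out = get_neighbour_block_alt input x y radius
instance (input : List (List String)) (x : Int) (y : Int) (radius : Int) (out : List (List String)) : Decidable (Spec_get_neighbour_block input x y radius out) := by unfold Spec_get_neighbour_block; infer_instance

-- ===== CLAIM (what is proved, stated in full; the proofs are below) =====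
def Claim_equal_get_neighbour_block : Prop := ∀ (input : List (List String)) (x : Int) (y : Int) (radius : Int), Dom_get_neighbour_block input x y radius → Spec_get_neighbour_block input x y radius (get_neighbour_block input x y radius)

-- ===== LEMMAS AND PROOFS =====

-- a range shifted by a constant
lemma pyRange_shift (c a b : Int) :
    PySem.List.pyRange (c + a) (c + b) 1 = (PySem.List.pyRange a b 1).map (fun j => c + j) := by
  rw [PySem.List.pyRange_one, PySem.List.pyRange_one, List.map_map]
  have h : c + b - (c + a) = b - a := by ring
  rw [h]
  apply List.map_congr_left
  intro k _
  simp only [Function.comp_apply]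
  ring

-- map of a constant over a range is replicate
lemma map_range_const {α : Type} (a b : Int) (f : Int → α) (c : α)
    (h : ∀ j, a ≤ j → j < b → f j = c) :
    (PySem.List.pyRange a b 1).map f = List.replicate (b - a).toNat c := by
  have hlen : ((PySem.List.pyRange a b 1).map f).length = (b - a).toNat := by
    rw [List.length_map, PySem.List.length_pyRange_one]
  rw [← hlen]
  apply List.eq_replicate_of_mem
  intro v hv
  rcases List.mem_map.mp hv with ⟨j, hj, rfl⟩
  rcases PySem.List.mem_pyRange_one.mp hj with ⟨h1, h2⟩
  exact h j h1 h2

-- map of in-range gets over a range is take/drop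
lemma map_range_get (row : List String) (a b : Int) (h0 : 0 ≤ a) (hab : a ≤ b)
    (hb : b ≤ (row.length : Int)) :
    (PySem.List.pyRange a b 1).map (fun j => (PySem.List.pyGet? row j).getD "") =
      List.take (b.toNat - a.toNat) (List.drop a.toNat row) := by
  obtain ⟨n, hn⟩ : ∃ n : Nat, (n : Int) = b - a := ⟨(b - a).toNat, by omega⟩
  induction n generalizing a with
  | zero =>
    have hba : b ≤ a := by omega
    rw [PySem.List.pyRange_one_eq_nil hba]
    have : b.toNat - a.toNat = 0 := by omega
    rw [this]
    simp
  | succ k ih =>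
    have hab' : a < b := by omega
    rw [PySem.List.pyRange_one_cons hab', List.map_cons]
    have hlt : a < (row.length : Int) := by omega
    rw [PySem.List.pyGet?_eq_some_getElem row h0 hlt]
    have hdrop : List.drop a.toNat row = row[a.toNat] :: List.drop (a.toNat + 1) row := by
      rw [List.drop_eq_getElem_cons (by omega)]
    rw [hdrop]
    have hto : b.toNat - a.toNat = (b.toNat - (a.toNat + 1)) + 1 := by omega
    rw [hto, List.take_succ_cons]
    have hrec := ih (a + 1) (by omega) (by omega) (by omega)
    have h1 : (a + 1).toNat = a.toNat + 1 := by omega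
    rw [h1] at hrec
    rw [hrec]
    simp

-- the per-row identity: a window of bounds-checked lookups is a clamped slice padded with ''
lemma row_eq (row : List String) (L R : Int) (hLR : L ≤ R) :
    (PySem.List.pyRange L R 1).map
        (fun j => if j < 0 ∨ j ≥ (row.length : Int) then ""
                  else (PySem.List.pyGet? row j).getD "") =
      List.replicate (min (R - L) (max 0 (max 0 L - L))).toNat "" ++
        (if max 0 L < min (row.length : Int) R then
          PySem.List.slice row (some (max 0 L)) (some (min (row.length : Int) R)) else []) ++
        List.replicate (R - L - min (R - L) (max 0 (max 0 L - L)) -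
          ((if max 0 L < min (row.length : Int) R then
            PySem.List.slice row (some (max 0 L)) (some (min (row.length : Int) R)) else []).length : Int)).toNat "" := by
  have hn : (0 : Int) ≤ (row.length : Int) := by positivity
  set n := (row.length : Int) with hn_def
  set m1 := max L (min R 0) with hm1
  set m2 := max L (min R n) with hm2
  have h1 : L ≤ m1 := by omega
  have h12 : m1 ≤ m2 := by omega
  have h2 : m2 ≤ R := by omega
  rw [PySem.List.pyRange_one_append L m1 R h1 (by omega),
      PySem.List.pyRange_one_append m1 m2 R h12 h2, List.map_append, List.map_append]
  -- left segment: all indices negative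
  have hseg1 : (PySem.List.pyRange L m1 1).map
      (fun j => if j < 0 ∨ j ≥ n then "" else (PySem.List.pyGet? row j).getD "") =
      List.replicate (m1 - L).toNat "" := by
    apply map_range_const
    intro j hja hjb
    have : j < 0 := by omega
    rw [if_pos (Or.inl this)]
  -- right segment: all indices past the end
  have hseg3 : (PySem.List.pyRange m2 R 1).map
      (fun j => if j < 0 ∨ j ≥ n then "" else (PySem.List.pyGet? row j).getD "") =
      List.replicate (R - m2).toNat "" := by
    apply map_range_const
    intro j hja hjb
    have : j ≥ n := by omega
    rw [if_pos (Or.inr this)]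
  rw [hseg1, hseg3]
  by_cases hmid : max 0 L < min n R
  · -- nonempty middle
    have ha1 : m1 = max 0 L := by omega
    have ha2 : m2 = min n R := by omega
    have hseg2 : (PySem.List.pyRange m1 m2 1).map
        (fun j => if j < 0 ∨ j ≥ n then "" else (PySem.List.pyGet? row j).getD "") =
        List.take (m2.toNat - m1.toNat) (List.drop m1.toNat row) := by
      rw [List.map_congr_left (g := fun j => (PySem.List.pyGet? row j).getD "")]
      · exact map_range_get row m1 m2 (by omega) h12 (by omega)
      · intro j hj
        rcases PySem.List.mem_pyRange_one.mp hj with ⟨hja, hjb⟩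
        have : ¬ (j < 0 ∨ j ≥ n) := by omega
        rw [if_neg this]
    rw [hseg2, if_pos hmid,
        PySem.List.slice_of_nonneg row (by omega) (by omega) (by omega) (by omega)]
    have e1 : (min (R - L) (max 0 (max 0 L - L))).toNat = (m1 - L).toNat := by omega
    have elen : (List.take ((min n R).toNat - (max 0 L).toNat)
        (List.drop (max 0 L).toNat row)).length = (min n R).toNat - (max 0 L).toNat := by
      rw [List.length_take, List.length_drop]
      omega
    have e2 : (R - L - min (R - L) (max 0 (max 0 L - L)) -
        ((List.take ((min n R).toNat - (max 0 L).toNat)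
          (List.drop (max 0 L).toNat row)).length : Int)).toNat = (R - m2).toNat := by
      rw [elen]; omega
    rw [e1, e2, ha1, ha2, List.append_assoc]
  · -- empty middle
    have hm : m1 = m2 := by omega
    rw [if_neg hmid]
    rw [← hm, PySem.List.pyRange_one_eq_nil (le_refl m1)]
    have e1 : (min (R - L) (max 0 (max 0 L - L))).toNat = (m1 - L).toNat := by omega
    have e2 : (R - L - min (R - L) (max 0 (max 0 L - L)) - (([] : List String).length : Int)).toNat
        = (R - m1).toNat := by simp; omega
    rw [e1, e2]
    simp

-- ===== VERDICT (by name: the statement is the Claim_ definition above) =====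

theorem get_neighbour_block_spec : Claim_equal_get_neighbour_block := by
  intro input x y radius _
  unfold Spec_get_neighbour_block get_neighbour_block get_neighbour_block_alt try_index
  set lo := PySem.Int.floordiv (-radius) 2 with hlo
  set hi := PySem.Int.floordiv radius 2 with hhi
  simp only []
  by_cases hw : hi - lo + 1 ≤ 0
  · rw [if_pos hw, PySem.List.pyRange_one_eq_nil (by omega : hi + 1 ≤ lo)]
    simp [List.foldl]
  · rw [if_neg hw]
    rw [PySem.List.foldl_append_singleton_eq_map]
    rw [List.nil_append]
    apply List.map_congr_left
    intro dy _
    rw [PySem.List.foldl_append_singleton_eq_map, List.nil_append]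
    by_cases hr : y + dy < 0 ∨ y + dy ≥ (input.length : Int)
    · simp only [if_pos hr]
      rw [map_range_const lo (hi + 1) _ "" (fun j _ _ => rfl)]
      congr 1
      omega
    · simp only [if_neg hr]
      set row := (PySem.List.pyGet? input (y + dy)).getD [] with hrow
      have hshift : (PySem.List.pyRange lo (hi + 1) 1).map
          (fun x_offset => if x + x_offset < 0 ∨ x + x_offset ≥ (row.length : Int) then ""
            else (PySem.List.pyGet? row (x + x_offset)).getD "") =
          (PySem.List.pyRange (x + lo) (x + (hi + 1)) 1).map
          (fun j => if j < 0 ∨ j ≥ (row.length : Int) then ""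
            else (PySem.List.pyGet? row j).getD "") := by
        rw [pyRange_shift x lo (hi + 1), List.map_map]
        rfl
      rw [hshift]
      have hLR : x + lo ≤ x + (hi + 1) := by omega
      rw [row_eq row (x + lo) (x + (hi + 1)) hLR]
      have e0 : x + (hi + 1) = x + hi + 1 := by ring
      have e1 : x + hi + 1 - (x + lo) = hi - lo + 1 := by ring
      rw [e0, e1]
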